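-- pv_equiv track=rewrite | github.com/MrBrantCode/unitest_baseline | mut_generate/mist_train_taco/taco_9436/solution.py | min_operations_to_alternating
-- ===== SOURCE A (Python) =====
-- def min_operations_to_alternating(s: str) -> int:
--     n = len(s)
--
--     # Calculate the number of operations needed for the pattern starting with '0'
--     c0 = 0
--     o0 = []
--     for i in range(n):
--         if s[i] == '0':
--             c0 += 1
--         else:
--             if c0 != 0:
--                 o0.append(c0)
--             c0 = 0
--     if c0 != 0:
--         o0.append(c0)
--     x = sum(o0) - len(o0)
--
--     # Calculate the number of operations needed for the pattern starting with '1'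
--     c1 = 0
--     o1 = []
--     for i in range(n):
--         if s[i] == '1':
--             c1 += 1
--         else:
--             if c1 != 0:
--                 o1.append(c1)
--             c1 = 0
--     if c1 != 0:
--         o1.append(c1)
--     y = sum(o1) - len(o1)
--
--     # Return the minimum number of operations
--     return max(x, y)
-- ===== SOURCE B (Python) =====
-- def min_operations_to_alternating(s: str) -> int:
--     c00 = 0
--     c11 = 0
--     for a, b in zip(s, s[1:]):
--         if a == b == '0':
--             c00 += 1
--         elif a == b == '1':
--             c11 += 1
--     return max(c00, c11)
-- ===== Notes on version B (the rewrite author's own statement) =====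
-- stated objective: simpler
-- what changed: Replaces the two run-length passes that build lists of run lengths and compute sum-minus-count with a single list-free pass over adjacent character pairs maintaining two integer counters of equal zero-pairs and equal one-pairs.
import Mathlib
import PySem

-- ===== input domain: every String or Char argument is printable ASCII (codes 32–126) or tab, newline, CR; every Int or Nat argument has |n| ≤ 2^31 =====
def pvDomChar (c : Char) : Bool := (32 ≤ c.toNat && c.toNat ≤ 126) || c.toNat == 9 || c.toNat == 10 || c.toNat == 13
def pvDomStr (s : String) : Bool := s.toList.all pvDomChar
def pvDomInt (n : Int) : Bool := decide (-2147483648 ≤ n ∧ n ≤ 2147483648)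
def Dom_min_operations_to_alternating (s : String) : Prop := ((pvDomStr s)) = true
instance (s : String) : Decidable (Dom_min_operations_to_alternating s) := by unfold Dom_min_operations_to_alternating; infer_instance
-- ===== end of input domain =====

-- B replaces A's two run-length passes (lists of run lengths, sum minus count) by one
-- list-free pass over adjacent pairs with two integer counters; simpler, and the timing
-- run measured it faster by a constant factor.

-- ===== PORT A =====
-- A runs the same run-collecting loop once for '0' and once for '1'; the shared loop body
-- is parameterised by the character, exactly as in the Python text.
def pvALoop (ch : Char) (st : Int × List Int) (c : Char) : Int × List Int :=
  if c = ch then (st.1 + 1, st.2)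
  else if st.1 ≠ 0 then (0, st.2 ++ [st.1]) else (0, st.2)

def pvASide (ch : Char) (l : List Char) : Int :=
  let st := l.foldl (pvALoop ch) (0, [])
  let o := if st.1 ≠ 0 then st.2 ++ [st.1] else st.2
  o.sum - (o.length : Int)

def min_operations_to_alternating (s : String) : Int :=
  max (pvASide '0' s.toList) (pvASide '1' s.toList)

-- ===== PORT B =====
def pvBStep (st : Int × Int) (p : Char × Char) : Int × Int :=
  if p.1 = p.2 ∧ p.2 = '0' then (st.1 + 1, st.2)
  else if p.1 = p.2 ∧ p.2 = '1' then (st.1, st.2 + 1)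
  else st

def min_operations_to_alternating_alt (s : String) : Int :=
  let l := s.toList
  let st := (l.zip l.tail).foldl pvBStep (0, 0)
  max st.1 st.2

-- ===== PRECONDITION & SPEC =====
def Spec_min_operations_to_alternating (s : String) (out : Int) : Prop := out = min_operations_to_alternating_alt s
instance (s : String) (out : Int) : Decidable (Spec_min_operations_to_alternating s out) := by unfold Spec_min_operations_to_alternating; infer_instance

-- ===== CLAIM (what is proved, stated in full; the proofs are below) =====
def Claim_equal_min_operations_to_alternating : Prop := ∀ (s : String), Dom_min_operations_to_alternating s → Spec_min_operations_to_alternating s (min_operations_to_alternating s)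

-- ===== LEMMAS AND PROOFS =====

-- number of adjacent positions where the previous char (prev : was it = ch?) and the
-- current char both equal ch
def pvPCount (ch : Char) : Bool → List Char → Int
  | _, [] => 0
  | prev, c :: rest => (if prev ∧ c = ch then 1 else 0) + pvPCount ch (c == ch) rest

lemma pvASide_key (ch : Char) : ∀ (l : List Char) (c0 : Int) (o : List Int), 0 ≤ c0 →
    (let st := l.foldl (pvALoop ch) (c0, o)
     let o' := if st.1 ≠ 0 then st.2 ++ [st.1] else st.2
     o'.sum - (o'.length : Int))
    = (o.sum - (o.length : Int)) + (if c0 ≠ 0 then c0 - 1 else 0)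
      + pvPCount ch (decide (0 < c0)) l := by
  intro l
  induction l with
  | nil =>
    intro c0 o h
    simp only [List.foldl, pvPCount]
    by_cases hc : c0 ≠ 0 <;> simp [hc] <;> try ring
  | cons c rest ih =>
    intro c0 o h
    simp only [List.foldl_cons, pvALoop, pvPCount]
    by_cases hceq : c = ch
    · rw [if_pos hceq, ih (c0 + 1) o (by omega)]
      have h2 : decide (0 < c0 + 1) = true := by simp; omega
      have h3 : (c == ch) = true := by simp [hceq]
      rw [h2, h3]
      simp only [hceq, and_true]
      generalize pvPCount ch true rest = P
      by_cases hc : c0 = 0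
      · simp [hc]
      · simp [hc]
        split_ifs <;> omega
    · rw [if_neg hceq]
      have hb : (c == ch) = false := by simp [hceq]
      simp only [hceq, and_false, if_false, hb]
      by_cases hc : c0 ≠ 0
      · rw [if_pos hc, ih 0 (o ++ [c0]) (by omega)]
        simp [hc]
        ring
      · rw [if_neg hc, ih 0 o (by omega)]
        simp [hc]

lemma pvASide_eq (ch : Char) (l : List Char) :
    pvASide ch l = pvPCount ch false l := by
  have h := pvASide_key ch l 0 [] (by omega)
  simp only [pvASide]
  simpa using h

lemma pvB_fold (l : List Char) : ∀ (prev : Char) (a b : Int),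
    ((prev :: l).zip l).foldl pvBStep (a, b)
    = (a + pvPCount '0' (prev == '0') l, b + pvPCount '1' (prev == '1') l) := by
  induction l with
  | nil => intro prev a b; simp [pvPCount]
  | cons c rest ih =>
    intro prev a b
    have hz : ((prev :: c :: rest).zip (c :: rest))
        = (prev, c) :: ((c :: rest).zip rest) := by simp [List.zip]
    rw [hz, List.foldl_cons, pvBStep, ih c]
    simp only [pvPCount]
    by_cases pc : prev = c
    · subst pc
      by_cases c0 : prev = '0'
      · simp [c0, Prod.ext_iff]
        ring
      · by_cases c1 : prev = '1'
        · simp [c1, Prod.ext_iff]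
          ring
        · simp [c0, c1]
    · have e0 : ¬ (prev = c ∧ c = '0') := fun hx => pc hx.1
      have e1 : ¬ (prev = c ∧ c = '1') := fun hx => pc hx.1
      simp only [if_neg e0, if_neg e1]
      by_cases p0 : prev = '0' <;> by_cases c0 : c = '0' <;>
        by_cases p1 : prev = '1' <;> by_cases c1 : c = '1' <;>
        simp_all [Prod.ext_iff]

lemma min_ops_eq (s : String) :
    min_operations_to_alternating s = min_operations_to_alternating_alt s := by
  unfold min_operations_to_alternating min_operations_to_alternating_alt
  rw [pvASide_eq, pvASide_eq]
  cases hl : s.toList with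
  | nil => simp [pvPCount]
  | cons c rest =>
    simp only [List.tail_cons]
    rw [pvB_fold rest c 0 0]
    simp [pvPCount]

-- ===== VERDICT (by name: the statement is the Claim_ definition above) =====
theorem min_operations_to_alternating_spec : Claim_equal_min_operations_to_alternating := by
  intro s _
  unfold Spec_min_operations_to_alternating
  exact min_ops_eq s
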